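-- pv_equiv track=rewrite | github.com/ivanillera/TP1Sintaxis | bigorequal.py | a_bigorequal
-- ===== SOURCE A (Python) =====
-- TRAMPA = -1
--
-- RESULTADO_ACEPTADO = "ACEPTADO"
--
-- RESULTADO_TRAMPA = "TRAMPA"
--
-- RESULTADO_NO_ACEPTADO = "NO_ACEPTADO"
--
-- def d_bigorequal(estado_anterior, caracter):
--     if estado_anterior == 0 and caracter == ">":
--         return 1
--     if estado_anterior == 1 and caracter == "=":
--         return 2
--     return TRAMPA
--
-- def a_bigorequal(cadena):
--     Finales = [2]
--     estado_actual = 0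
--
--     for caracter in cadena:
--         estado_proximo = d_bigorequal(estado_actual, caracter)
--         if estado_proximo == TRAMPA:
--             return RESULTADO_TRAMPA
--         estado_actual = estado_proximo
--
--     if estado_actual in Finales:
--         return RESULTADO_ACEPTADO
--     else:
--         return RESULTADO_NO_ACEPTADO
-- ===== SOURCE B (Python) =====
-- def a_bigorequal(cadena):
--     chars = list(cadena)
--     if chars == [">", "="]:
--         return "ACEPTADO"
--     if chars == [] or chars == [">"]:
--         return "NO_ACEPTADO"
--     return "TRAMPA"
-- ===== Notes on version B (the rewrite author's own statement) =====
-- stated objective: simpler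
-- what changed: Replaces the DFA transition-function loop with a direct closed-form comparison of the materialized character list against the only accepted/rejected-without-trap strings.
import Mathlib
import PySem

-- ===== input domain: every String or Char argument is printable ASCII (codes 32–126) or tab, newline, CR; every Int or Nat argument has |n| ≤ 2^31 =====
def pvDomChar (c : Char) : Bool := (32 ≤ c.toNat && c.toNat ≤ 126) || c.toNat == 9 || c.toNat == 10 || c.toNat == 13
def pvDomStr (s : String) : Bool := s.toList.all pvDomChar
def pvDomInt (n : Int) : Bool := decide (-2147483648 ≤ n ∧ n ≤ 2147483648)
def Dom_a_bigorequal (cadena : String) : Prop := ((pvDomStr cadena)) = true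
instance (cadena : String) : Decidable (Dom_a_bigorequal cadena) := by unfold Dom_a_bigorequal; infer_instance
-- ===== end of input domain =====

-- B replaces A's per-character DFA transition loop with a closed-form comparison
-- of the whole character list; objective: simpler.

-- ===== PORT A =====
-- transition function d_bigorequal
def d_bigorequal (estado_anterior : Int) (caracter : Char) : Int :=
  if estado_anterior = 0 ∧ caracter = '>' then 1
  else if estado_anterior = 1 ∧ caracter = '=' then 2
  else -1

-- the for-loop with early return, as structural recursion over the same state
def a_bigorequal_loop (estado_actual : Int) (rest : List Char) : String :=
  match rest with
  | [] => if estado_actual ∈ ([2] : List Int) then "ACEPTADO" else "NO_ACEPTADO"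
  | caracter :: cs =>
      let estado_proximo := d_bigorequal estado_actual caracter
      if estado_proximo = -1 then "TRAMPA"
      else a_bigorequal_loop estado_proximo cs

def a_bigorequal (cadena : String) : String :=
  a_bigorequal_loop 0 cadena.toList

-- ===== PORT B =====
def a_bigorequal_alt (cadena : String) : String :=
  let chars := cadena.toList
  if chars = ['>', '='] then "ACEPTADO"
  else if chars = [] ∨ chars = ['>'] then "NO_ACEPTADO"
  else "TRAMPA"

-- ===== PRECONDITION & SPEC =====
def Spec_a_bigorequal (cadena : String) (out : String) : Prop := out = a_bigorequal_alt cadena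
instance (cadena : String) (out : String) : Decidable (Spec_a_bigorequal cadena out) := by unfold Spec_a_bigorequal; infer_instance

-- ===== CLAIM (what is proved, stated in full; the proofs are below) =====
def Claim_equal_a_bigorequal : Prop := ∀ (cadena : String), Dom_a_bigorequal cadena → Spec_a_bigorequal cadena (a_bigorequal cadena)

-- ===== LEMMAS AND PROOFS =====

-- from state 2 any further character traps
lemma loop_state2 (c : Char) (cs : List Char) :
    a_bigorequal_loop 2 (c :: cs) = "TRAMPA" := by
  simp [a_bigorequal_loop, d_bigorequal]

lemma loop_eq_alt (l : List Char) :
    a_bigorequal_loop 0 l =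
      (if l = ['>', '='] then "ACEPTADO"
       else if l = [] ∨ l = ['>'] then "NO_ACEPTADO"
       else "TRAMPA") := by
  match l with
  | [] => simp [a_bigorequal_loop]
  | [c] =>
    by_cases h : c = '>'
    · subst h; simp [a_bigorequal_loop, d_bigorequal]
    · simp [a_bigorequal_loop, d_bigorequal, h]
  | c1 :: c2 :: cs =>
    by_cases h1 : c1 = '>'
    · subst h1
      by_cases h2 : c2 = '='
      · subst h2
        cases cs with
        | nil => simp [a_bigorequal_loop, d_bigorequal]
        | cons c3 cs' =>
          simp only [a_bigorequal_loop, d_bigorequal]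
          simp [loop_state2]
      · simp [a_bigorequal_loop, d_bigorequal, h2]
    · simp [a_bigorequal_loop, d_bigorequal, h1]

-- ===== VERDICT (by name: the statement is the Claim_ definition above) =====
theorem a_bigorequal_spec : Claim_equal_a_bigorequal := by
  intro cadena _
  unfold Spec_a_bigorequal a_bigorequal a_bigorequal_alt
  rw [loop_eq_alt]
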